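-- pv_equiv track=rewrite | github.com/devMichael23/create_tree | BracketTreeMaxLevel.py | btml
-- ===== SOURCE A (Python) =====
-- def btml(string):
--     count = 0
--     lst = [0]
--     for i in string:
--         if i == '(':
--             count += 1
--             lst.append(count)
--         elif i == ')':
--             count -= 1
--             lst.append(count)
--     return max(lst)
-- ===== SOURCE B (Python) =====
-- def btml(string):
--     # Divide and conquer: for a segment return (net bracket delta, max running
--     # depth over its prefixes, the empty prefix included). Combining left and
--     # right: depths in the right half are shifted by the left half's net delta.
--     def seg(lo, hi):
--         if hi - lo == 0:
--             return (0, 0)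
--         if hi - lo == 1:
--             c = string[lo]
--             d = 1 if c == '(' else -1 if c == ')' else 0
--             return (d, max(d, 0))
--         mid = (lo + hi) // 2
--         ls, lb = seg(lo, mid)
--         rs, rb = seg(mid, hi)
--         return (ls + rs, max(lb, ls + rb))
--     return seg(0, len(string))[1]
-- ===== Notes on version B (the rewrite author's own statement) =====
-- stated objective: alternative
-- what changed: Replaces the left-to-right counter scan by a divide-and-conquer recursion that computes for each half the pair (net bracket delta, max prefix depth) and merges them with max(lb, ls+rb).
import Mathlib
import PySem

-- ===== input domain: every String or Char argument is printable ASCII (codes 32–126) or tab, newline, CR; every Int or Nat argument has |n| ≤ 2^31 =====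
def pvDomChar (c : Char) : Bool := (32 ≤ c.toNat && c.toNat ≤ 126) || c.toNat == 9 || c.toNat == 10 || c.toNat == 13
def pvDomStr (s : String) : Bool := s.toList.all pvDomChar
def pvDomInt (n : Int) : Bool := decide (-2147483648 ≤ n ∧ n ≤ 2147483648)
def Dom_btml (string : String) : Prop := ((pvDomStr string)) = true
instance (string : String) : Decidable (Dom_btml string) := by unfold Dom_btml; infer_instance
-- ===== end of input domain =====

-- B computes the answer by divide and conquer: each segment yields (net bracket delta,
-- max prefix depth), halves are merged with max(lb, ls+rb); A scans left to right with a
-- counter and takes the max of the recorded counts. Return-value equivalence only.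

-- ===== PORT A =====
def btmlStep (s : Int × List Int) (c : Char) : Int × List Int :=
  if c = '(' then (s.1 + 1, s.2 ++ [s.1 + 1])
  else if c = ')' then (s.1 - 1, s.2 ++ [s.1 - 1])
  else s

def btml (string : String) : Int :=
  -- Python's max(lst) never raises here: lst starts as [0]; the getD 0 default is unreachable
  (PySem.List.max? (string.toList.foldl btmlStep (0, [0])).2 (fun y => y)).getD 0

-- ===== PORT B =====
def btmlDelta (c : Char) : Int := if c = '(' then 1 else if c = ')' then -1 else 0

/-- B's seg(lo,hi), on the sublist itself: (net delta, max prefix depth incl. empty prefix).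
The fuel argument (list length suffices) only makes the halving recursion structural. -/
def btmlSegF : Nat → List Char → Int × Int
  | _, [] => (0, 0)
  | _, [c] => (btmlDelta c, max (btmlDelta c) 0)
  | 0, _ :: _ :: _ => (0, 0)  -- fuel exhausted: unreachable when fuel ≥ length
  | f + 1, c1 :: c2 :: rest =>
    -- mid = (lo + hi) // 2, i.e. the first half has length/2 characters
    ((btmlSegF f ((c1 :: c2 :: rest).take ((c1 :: c2 :: rest).length / 2))).1
       + (btmlSegF f ((c1 :: c2 :: rest).drop ((c1 :: c2 :: rest).length / 2))).1,
     max (btmlSegF f ((c1 :: c2 :: rest).take ((c1 :: c2 :: rest).length / 2))).2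
       ((btmlSegF f ((c1 :: c2 :: rest).take ((c1 :: c2 :: rest).length / 2))).1
         + (btmlSegF f ((c1 :: c2 :: rest).drop ((c1 :: c2 :: rest).length / 2))).2))

def btml_alt (string : String) : Int := (btmlSegF string.toList.length string.toList).2

-- ===== PRECONDITION & SPEC =====
def Spec_btml (string : String) (out : Int) : Prop := out = btml_alt string
instance (string : String) (out : Int) : Decidable (Spec_btml string out) := by unfold Spec_btml; infer_instance

-- ===== CLAIM (what is proved, stated in full; the proofs are below) =====
def Claim_equal_btml : Prop := ∀ (string : String), Dom_btml string → Spec_btml string (btml string)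

-- ===== LEMMAS AND PROOFS =====

/-- Max prefix sum (empty prefix included) of a delta list — the common functional spec. -/
def pmaxD : List Int → Int
  | [] => 0
  | x :: t => max 0 (x + pmaxD t)

theorem pmaxD_nonneg (l : List Int) : 0 ≤ pmaxD l := by
  cases l with
  | nil => simp [pmaxD]
  | cons x t => simp [pmaxD]

theorem pmaxD_append (a b : List Int) :
    pmaxD (a ++ b) = max (pmaxD a) (a.sum + pmaxD b) := by
  induction a with
  | nil => have := pmaxD_nonneg b; simp [pmaxD]; omega
  | cons x t ih => simp [pmaxD, ih]; omega

/-- The list of counter values A appends, starting from count `k`. -/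
def btmlEmitted (k : Int) : List Char → List Int
  | [] => []
  | c :: cs =>
    if c = '(' then (k + 1) :: btmlEmitted (k + 1) cs
    else if c = ')' then (k - 1) :: btmlEmitted (k - 1) cs
    else btmlEmitted k cs

theorem btml_foldl_snd (cs : List Char) : ∀ (k : Int) (lst : List Int),
    (cs.foldl btmlStep (k, lst)).2 = lst ++ btmlEmitted k cs := by
  induction cs with
  | nil => intro k lst; simp [btmlEmitted]
  | cons c cs ih =>
    intro k lst
    by_cases h1 : c = '('
    · simp [btmlStep, btmlEmitted, h1, ih]
    · by_cases h2 : c = ')'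
      · simp [btmlStep, btmlEmitted, h2, ih]
      · simp [btmlStep, btmlEmitted, h1, h2, ih]

/-- A's max over the emitted counts, folded from `a ≥ k`, is `max a (k + pmaxD deltas)`. -/
theorem btml_emitted_max (cs : List Char) : ∀ (k a : Int), k ≤ a →
    (btmlEmitted k cs).foldl max a = max a (k + pmaxD (cs.map btmlDelta)) := by
  induction cs with
  | nil => intro k a hk; simp [btmlEmitted, pmaxD]; omega
  | cons c cs ih =>
    intro k a hk
    have hnn := pmaxD_nonneg (cs.map btmlDelta)
    by_cases h1 : c = '('
    · subst h1
      have e : btmlEmitted k ('(' :: cs) = (k + 1) :: btmlEmitted (k + 1) cs := by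
        simp [btmlEmitted]
      have ed : btmlDelta '(' = 1 := by simp [btmlDelta]
      rw [e, List.foldl_cons, ih (k + 1) (max a (k + 1)) (le_max_right _ _)]
      simp only [List.map_cons, pmaxD, ed]
      omega
    · by_cases h2 : c = ')'
      · subst h2
        have e : btmlEmitted k (')' :: cs) = (k - 1) :: btmlEmitted (k - 1) cs := by
          simp [btmlEmitted]
        have ed : btmlDelta ')' = -1 := by simp [btmlDelta]
        rw [e, List.foldl_cons, ih (k - 1) (max a (k - 1)) (le_max_right _ _)]
        simp only [List.map_cons, pmaxD, ed]
        omega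
      · have e : btmlEmitted k (c :: cs) = btmlEmitted k cs := by
          simp [btmlEmitted, h1, h2]
        have ed : btmlDelta c = 0 := by simp [btmlDelta, h1, h2]
        rw [e, ih k a hk]
        simp only [List.map_cons, pmaxD, ed]
        omega

/-- B's divide-and-conquer returns exactly (sum of deltas, max prefix depth),
given enough fuel. -/
theorem btmlSegF_spec (n : Nat) : ∀ (l : List Char), l.length ≤ n →
    btmlSegF n l = ((l.map btmlDelta).sum, pmaxD (l.map btmlDelta)) := by
  induction n with
  | zero =>
    intro l hl
    match l, hl with
    | [], _ => simp [btmlSegF, pmaxD]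
  | succ f ih =>
    intro l hl
    match l with
    | [] => simp [btmlSegF, pmaxD]
    | [c] => simp [btmlSegF, pmaxD]; omega
    | c1 :: c2 :: rest =>
      rw [btmlSegF]
      have hlen : (c1 :: c2 :: rest).length = rest.length + 2 := by simp
      rw [ih _ (by rw [List.length_take]; omega), ih _ (by rw [List.length_drop]; omega)]
      have hmap : (c1 :: c2 :: rest).map btmlDelta
          = ((c1 :: c2 :: rest).take ((c1 :: c2 :: rest).length / 2)).map btmlDelta
            ++ ((c1 :: c2 :: rest).drop ((c1 :: c2 :: rest).length / 2)).map btmlDelta := by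
        rw [← List.map_append, List.take_append_drop]
      rw [hmap, List.sum_append, pmaxD_append]

-- ===== VERDICT (by name: the statement is the Claim_ definition above) =====
theorem btml_spec : Claim_equal_btml := by
  intro s _
  unfold Spec_btml btml btml_alt
  rw [btml_foldl_snd, btmlSegF_spec _ _ le_rfl]
  simp only [List.cons_append, List.nil_append]
  rw [PySem.List.max?_id_cons]
  simp only [Option.getD_some]
  rw [btml_emitted_max s.toList 0 0 le_rfl]
  have := pmaxD_nonneg (s.toList.map btmlDelta)
  omega
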